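-- pv_equiv track=rewrite | github.com/jordisans/AdventOfCode | 2019/day4/day4.py | HasRepeatedNumberPart2
-- ===== SOURCE A (Python) =====
-- def HasRepeatedNumberPart2(password):
--     compareTo = "-1"
--     repeatedNumInstances = 1
--     for digit in password:
--         if compareTo == digit:
--             repeatedNumInstances += 1
--         else:
--             if repeatedNumInstances == 2:
--                 return True
--             repeatedNumInstances = 1
--             compareTo = digit
--
--     return True if repeatedNumInstances == 2 else False
-- ===== SOURCE B (Python) =====
-- def HasRepeatedNumberPart2(password):
--     n = len(password)
--     return any(password[i] == password[i + 1]
--                and (i == 0 or password[i - 1] != password[i])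
--                and (i + 2 == n or password[i + 2] != password[i])
--                for i in range(n - 1))
-- ===== Notes on version B (the rewrite author's own statement) =====
-- stated objective: alternative
-- what changed: Replaced A's sequential run-length counter with sentinel and early return by a positional window test: for each index i, check directly that s[i]==s[i+1] while the left and right neighbours (if any) differ, i.e. i starts a maximal block of exactly two.
import Mathlib
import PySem

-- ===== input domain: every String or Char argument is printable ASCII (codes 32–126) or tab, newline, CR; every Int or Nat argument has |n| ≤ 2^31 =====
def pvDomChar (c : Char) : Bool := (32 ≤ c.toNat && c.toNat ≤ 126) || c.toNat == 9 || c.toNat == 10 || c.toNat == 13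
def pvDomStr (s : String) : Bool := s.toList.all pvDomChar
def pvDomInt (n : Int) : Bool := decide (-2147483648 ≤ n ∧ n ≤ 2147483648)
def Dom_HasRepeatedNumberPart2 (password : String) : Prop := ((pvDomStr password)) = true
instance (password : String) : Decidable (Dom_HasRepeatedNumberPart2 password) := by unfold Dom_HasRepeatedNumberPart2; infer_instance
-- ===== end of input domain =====

-- B replaces A's sequential run-length counter (with sentinel and early return) by a positional
-- window test: index i starts a maximal block of exactly two equal characters (objective: alternative).

-- ===== PORT A =====
-- A's loop: compareTo (a string, sentinel "-1"), repeatedNumInstances (Python int); early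
-- 'return True' when a finished run has length 2; the final check after the loop.
def pvALoop : List Char → String → Int → Bool
  | [], _, cnt => if cnt == 2 then true else false
  | d :: rest, cmp, cnt =>
    if cmp == String.ofList [d] then
      pvALoop rest cmp (cnt + 1)
    else
      if cnt == 2 then true
      else pvALoop rest (String.ofList [d]) 1

def HasRepeatedNumberPart2 (password : String) : Bool :=
  pvALoop password.toList "-1" 1

-- ===== PORT B =====
-- any(s[i]==s[i+1] and (i==0 or s[i-1]!=s[i]) and (i+2==n or s[i+2]!=s[i]) for i in range(n-1));
-- all indexing is in range, so l[·]! is exact here.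
def HasRepeatedNumberPart2_alt (password : String) : Bool :=
  let l := password.toList
  let n := l.length
  (List.range (n - 1)).any (fun i =>
    l[i]! == l[i + 1]! &&
    (i == 0 || !(l[i - 1]! == l[i]!)) &&
    (i + 2 == n || !(l[i + 2]! == l[i]!)))

-- ===== PRECONDITION & SPEC =====
def Spec_HasRepeatedNumberPart2 (password : String) (out : Bool) : Prop := out = HasRepeatedNumberPart2_alt password
instance (password : String) (out : Bool) : Decidable (Spec_HasRepeatedNumberPart2 password out) := by unfold Spec_HasRepeatedNumberPart2; infer_instance

-- ===== CLAIM (what is proved, stated in full; the proofs are below) =====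
def Claim_equal_HasRepeatedNumberPart2 : Prop := ∀ (password : String), Dom_HasRepeatedNumberPart2 password → Spec_HasRepeatedNumberPart2 password (HasRepeatedNumberPart2 password)

-- ===== LEMMAS AND PROOFS =====

-- proof-side helper: the lengths of the maximal runs of equal chars (A's counter, made explicit)
def pvRunsGo : List Char → Char → Nat → List Nat
  | [], _, n => [n]
  | d :: rest, c, n => if d == c then pvRunsGo rest c (n + 1) else n :: pvRunsGo rest d 1

-- proof-side helper: recursive form of B's window test; prev = the char just left of l (none at start)
def pvF : Option Char → List Char → Bool
  | _, [] => false
  | _, [_] => false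
  | prev, a :: b :: rest =>
      ((a == b) && !(prev == some a) && !(rest.head? == some a)) || pvF (some a) (b :: rest)

-- generalized indexed predicate: B's window test on l with left context prev
def pvH (prev : Option Char) (l : List Char) (i : Nat) : Bool :=
  l[i]! == l[i + 1]! &&
  (if i == 0 then !(prev == some l[0]!) else !(l[i - 1]! == l[i]!)) &&
  (i + 2 == l.length || !(l[i + 2]! == l[i]!))

theorem ofList_singleton_beq (c d : Char) :
    (String.ofList [c] == String.ofList [d]) = (c == d) := by
  by_cases h : c = d
  · subst h; simp
  · have : ¬ String.ofList [c] = String.ofList [d] := by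
      intro hs
      exact h (by simpa using congrArg String.toList hs)
    simp [this, h]

theorem sentinel_ne (d : Char) : (("-1" : String) == String.ofList [d]) = false := by
  simp only [beq_eq_false_iff_ne, ne_eq]
  intro h
  have := congrArg String.toList h
  simp [String.toList_ofList] at this

-- A-side: the scan from state (run char c, count n ≥ 1) answers the run-length question
theorem aLoop_eq_runsGo (l : List Char) (c : Char) (n : Int) (hn : 1 ≤ n) :
    pvALoop l (String.ofList [c]) n = (pvRunsGo l c n.toNat).any (fun m => m == 2) := by
  induction l generalizing c n with
  | nil =>
    simp only [pvALoop, pvRunsGo, List.any_cons, List.any_nil, Bool.or_false]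
    by_cases h : n = 2
    · subst h; simp
    · have h' : n.toNat ≠ 2 := by omega
      simp [h, h']
  | cons d rest ih =>
    simp only [pvALoop, pvRunsGo, ofList_singleton_beq]
    by_cases h : d = c
    · simp only [h, beq_self_eq_true, if_true]
      have h1 : (n + 1).toNat = n.toNat + 1 := by omega
      rw [ih c (n + 1) (by omega), h1]
    · have hcd : (c == d) = false := by
        simp only [beq_eq_false_iff_ne, ne_eq]; exact fun hh => h hh.symm
      have hdc : (d == c) = false := by
        simp only [beq_eq_false_iff_ne, ne_eq]; exact h
      simp only [hcd, hdc, Bool.false_eq_true, if_false, List.any_cons]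
      by_cases h2 : n = 2
      · subst h2; simp
      · have hnat : (n.toNat == 2) = false := by simp; omega
        have hn2 : (n == 2) = false := by simp [h2]
        simp only [hn2, Bool.false_eq_true, if_false, hnat, Bool.false_or]
        exact ih d 1 (le_refl 1)

-- absorption: a leading char equal to prev can never start a maximal block
theorem pvF_absorb (a : Char) (l : List Char) : pvF (some a) (a :: l) = pvF (some a) l := by
  cases l with
  | nil => rfl
  | cons b t => simp [pvF]

-- B-side bridge 1: index shift of the window predicate over a cons of two
theorem pvH_shift (prev : Option Char) (a b : Char) (rest : List Char) (i : Nat) :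
    pvH prev (a :: b :: rest) (i + 1) = pvH (some a) (b :: rest) i := by
  cases i with
  | zero => simp [pvH]
  | succ j => cases j with
    | zero => simp [pvH]
    | succ k => simp [pvH]

-- B-side bridge 2: the any-over-range form equals the recursive form
theorem any_range_pvH (l : List Char) (prev : Option Char) :
    (List.range (l.length - 1)).any (pvH prev l) = pvF prev l := by
  induction l generalizing prev with
  | nil => rfl
  | cons a t ih =>
    cases t with
    | nil => rfl
    | cons b rest =>
      have hlen : (a :: b :: rest).length - 1 = (b :: rest).length := by simp
      rw [hlen]
      simp only [List.length_cons]
      rw [List.range_succ_eq_map, List.any_cons, List.any_map]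
      have h0 : pvH prev (a :: b :: rest) 0 =
          ((a == b) && !(prev == some a) && !(rest.head? == some a)) := by
        cases rest with
        | nil => simp [pvH]
        | cons e t' => simp [pvH]
      have hsh : (pvH prev (a :: b :: rest) ∘ (· + 1)) = pvH (some a) (b :: rest) := by
        funext i; exact pvH_shift prev a b rest i
      rw [h0, hsh]
      have := ih (some a)
      simp only [List.length_cons, Nat.add_sub_cancel] at this
      rw [this]
      rfl

-- the key lemma: run-length answer = window answer, tracking the current run (char c, count n)
theorem runsGo_eq_pvF (l : List Char) (c : Char) (n : Nat) (hn : 1 ≤ n) :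
    (pvRunsGo l c n).any (fun m => m == 2) =
      ((n == 1 && l.head? == some c && !(l.tail.head? == some c)) ||
       (n == 2 && !(l.head? == some c)) ||
       pvF (some c) l) := by
  induction l generalizing c n with
  | nil => simp [pvRunsGo, pvF]
  | cons d t ih =>
    by_cases h : d = c
    · subst h
      have h1 : ((n + 1 : Nat) == 1) = false := by simp; omega
      have h2 : ((n + 1 : Nat) == 2) = (n == 1) := by
        cases n with
        | zero => rfl
        | succ m => cases m with
          | zero => rfl
          | succ k => rfl
      simp only [pvRunsGo, beq_self_eq_true, if_true, ih d (n + 1) (by omega), h1, h2,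
        List.head?_cons, List.tail_cons, pvF_absorb, Bool.false_and, Bool.false_or,
        beq_self_eq_true, Bool.and_true, Bool.not_true, Bool.and_false, Bool.or_false]
    · have hdc : (d == c) = false := by simp [h]
      have hcd : (some d == some c) = false := by simp [h]
      simp only [pvRunsGo, hdc, Bool.false_eq_true, if_false, List.any_cons,
        ih d 1 (le_refl 1), List.head?_cons, hcd, beq_self_eq_true, Bool.and_true,
        Bool.true_and, Bool.not_false, Bool.and_false, List.tail_cons]
      cases t with
      | nil => simp [pvF]
      | cons e t' =>
        have hne : ¬ c = d := fun hh => h hh.symm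
        have hb : (c == d) = false := by simp [hne]
        have hF : pvF (some c) (d :: e :: t') =
            (((d == e) && !(t'.head? == some d)) || pvF (some d) (e :: t')) := by
          simp [pvF, hb]
        have hcomm : (e == d) = (d == e) := by
          by_cases he : e = d
          · subst he; rfl
          · have hde : ¬ d = e := fun hh => he hh.symm
            simp [he, hde]
        simp [hF, hcomm]

-- B's literal predicate coincides with pvH none (the i = 0 branch is true either way)
theorem bpred_eq_pvH (l : List Char) :
    (fun i => l[i]! == l[i + 1]! &&
      (i == 0 || !(l[i - 1]! == l[i]!)) &&
      (i + 2 == l.length || !(l[i + 2]! == l[i]!))) = pvH none l := by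
  funext i
  cases i with
  | zero => simp [pvH]
  | succ j => simp [pvH]

-- ===== VERDICT (by name: the statement is the Claim_ definition above) =====
theorem HasRepeatedNumberPart2_spec : Claim_equal_HasRepeatedNumberPart2 := by
  intro password _
  unfold Spec_HasRepeatedNumberPart2 HasRepeatedNumberPart2 HasRepeatedNumberPart2_alt
  simp only []
  rw [bpred_eq_pvH, any_range_pvH]
  cases hl : password.toList with
  | nil => simp [pvALoop, pvF]
  | cons c rest =>
    simp only [pvALoop, sentinel_ne, Bool.false_eq_true, if_false]
    have h1 : ((1 : Int) == 2) = false := by decide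
    simp only [h1, Bool.false_eq_true, if_false]
    rw [aLoop_eq_runsGo rest c 1 (le_refl 1)]
    simp only [Int.toNat_one]
    rw [runsGo_eq_pvF rest c 1 (le_refl 1)]
    cases rest with
    | nil => simp [pvF]
    | cons d t =>
      by_cases hdc : d = c
      · subst hdc
        simp [pvF, pvF_absorb]
      · have h2 : (some d == some c) = false := by simp [hdc]
        have hcd' : ¬ c = d := fun hh => hdc hh.symm
        have h3 : (c == d) = false := by simp [hcd']
        simp [pvF, h2, h3]
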